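-- pv_equiv track=rewrite | github.com/parallel-p/please | please/import_from_polygon/lang_choice.py | make_language_choice
-- ===== SOURCE A (Python) =====
-- def make_language_choice(elements):
--     for element in elements:
--         if element.get('language') == 'russian':
--             return element
--     for element in elements:
--         if element.get('language') == 'english':
--             return element
--     if len(elements)>0:
--         return elements[0]
--     else:
--         return None
-- ===== SOURCE B (Python) =====
-- def make_language_choice(elements):
--     english = None
--     first = None
--     for element in elements:
--         lang = element.get('language')
--         if lang == 'russian':
--             return element
--         if lang == 'english' and english is None:
--             english = element
--         if first is None:
--             first = element
--     if english is not None: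
--         return english
--     return first
-- ===== Notes on version B (the rewrite author's own statement) =====
-- stated objective: alternative
-- what changed: Replaced A's two sequential scans plus a length/index fallback by a single pass that returns a russian element immediately while holding the first english element and the first element as state.
import Mathlib
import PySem

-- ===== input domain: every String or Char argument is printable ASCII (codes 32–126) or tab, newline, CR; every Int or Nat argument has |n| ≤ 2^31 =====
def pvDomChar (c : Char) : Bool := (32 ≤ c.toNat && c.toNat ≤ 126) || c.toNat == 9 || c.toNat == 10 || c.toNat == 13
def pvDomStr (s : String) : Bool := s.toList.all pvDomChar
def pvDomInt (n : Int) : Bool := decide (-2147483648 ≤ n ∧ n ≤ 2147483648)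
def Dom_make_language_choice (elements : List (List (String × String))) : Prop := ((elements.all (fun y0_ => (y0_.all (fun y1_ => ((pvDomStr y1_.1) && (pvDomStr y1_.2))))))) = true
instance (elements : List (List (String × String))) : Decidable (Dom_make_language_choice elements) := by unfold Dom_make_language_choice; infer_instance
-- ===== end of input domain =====

-- B replaces A's two sequential scans + length/index fallback by one pass holding the
-- first english element and the first element as state (alternative decomposition, same cost).


-- shared helper: Python's dict.get('language') on the association list (first match, none if absent)
def getLang (element : List (String × String)) : Option String :=
  (PySem.Dict.mk element).get? "language"

-- ===== PORT A =====
-- first loop of A: return the first element whose language is 'russian'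
def loopRus : List (List (String × String)) → Option (List (String × String))
  | [] => none
  | element :: rest =>
      if getLang element = some "russian" then some element else loopRus rest

-- second loop of A: return the first element whose language is 'english'
def loopEng : List (List (String × String)) → Option (List (String × String))
  | [] => none
  | element :: rest =>
      if getLang element = some "english" then some element else loopEng rest

def make_language_choice (elements : List (List (String × String))) : Option (List (String × String)) :=
  match loopRus elements with
  | some element => some element
  | none =>
    match loopEng elements with
    | some element => some element
    | none =>
      if elements.length > 0 then PySem.List.pyGet? elements 0 else none

-- ===== PORT B =====
-- B's single loop, carrying (english, first) as state
def loopB : Option (List (String × String)) → Option (List (String × String)) →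
    List (List (String × String)) → Option (List (String × String))
  | english, first, [] => if english.isSome then english else first
  | english, first, element :: rest =>
      let lang := getLang element
      if lang = some "russian" then some element
      else
        loopB (if lang = some "english" ∧ english = none then some element else english)
              (if first = none then some element else first) rest

def make_language_choice_alt (elements : List (List (String × String))) : Option (List (String × String)) :=
  loopB none none elements

-- ===== PRECONDITION & SPEC =====
def Spec_make_language_choice (elements : List (List (String × String))) (out : Option (List (String × String))) : Prop := out = make_language_choice_alt elements
instance (elements : List (List (String × String))) (out : Option (List (String × String))) : Decidable (Spec_make_language_choice elements out) := by unfold Spec_make_language_choice; infer_instance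

-- ===== CLAIM (what is proved, stated in full; the proofs are below) =====
def Claim_equal_make_language_choice : Prop := ∀ (elements : List (List (String × String))), Dom_make_language_choice elements → Spec_make_language_choice elements (make_language_choice elements)

-- ===== LEMMAS AND PROOFS =====

-- invariant of B's loop: it computes A's three-stage answer, with the carried state
-- standing in for the english/first candidates already seen
theorem loopB_eq (l : List (List (String × String)))
    (english first : Option (List (String × String))) :
    loopB english first l =
      match loopRus l with
      | some e => some e
      | none =>
        match english with
        | some e => some e
        | none =>
          match loopEng l with
          | some e => some e
          | none =>
            match first with
            | some f => some f
            | none => l.head? := by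
  induction l generalizing english first with
  | nil =>
      cases english <;> cases first <;> simp [loopB, loopRus, loopEng]
  | cons e rest ih =>
      by_cases hr : getLang e = some "russian"
      · simp [loopB, loopRus, hr]
      · by_cases he : getLang e = some "english"
        · cases english <;> cases first <;>
            simp [loopB, loopRus, loopEng, he, ih]
        · cases english <;> cases first <;>
            simp [loopB, loopRus, loopEng, hr, he, ih]

-- ===== VERDICT (by name: the statement is the Claim_ definition above) =====
theorem make_language_choice_spec : Claim_equal_make_language_choice := by
  intro elements _
  show make_language_choice elements = make_language_choice_alt elements
  unfold make_language_choice make_language_choice_alt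
  rw [loopB_eq]
  cases elements with
  | nil => simp [loopRus, loopEng]
  | cons e rest =>
      cases hR : loopRus (e :: rest) <;> cases hE : loopEng (e :: rest) <;>
        simp [PySem.List.pyGet?, PySem.List.pyIdx?]
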